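-- pv_equiv track=rewrite | github.com/AldenShinCulhane/job-agent | tools/generate_report.py | build_score_distribution
-- ===== SOURCE A (Python) =====
-- def build_score_distribution(jobs: list) -> str:
--     """ASCII histogram of score ranges."""
--     buckets = {"0-19": 0, "20-34": 0, "35-49": 0, "50-64": 0, "65-79": 0, "80-100": 0}
--     for job in jobs:
--         score = job.get("match_score", 0)
--         if score < 20:
--             buckets["0-19"] += 1
--         elif score < 35:
--             buckets["20-34"] += 1
--         elif score < 50:
--             buckets["35-49"] += 1
--         elif score < 65:
--             buckets["50-64"] += 1
--         elif score < 80: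
--             buckets["65-79"] += 1
--         else:
--             buckets["80-100"] += 1
--
--     max_count = max(buckets.values()) if buckets.values() else 1
--     lines = []
--     for range_label, count in buckets.items():
--         bar_len = int((count / max_count) * 30) if max_count > 0 else 0
--         bar = "#" * bar_len
--         marker = " <-- threshold" if range_label == "35-49" else ""
--         lines.append(f"  {range_label:>6}% | {bar:<30} {count}{marker}")
--     return "\n".join(lines)
-- ===== SOURCE B (Python) =====
-- def build_score_distribution(jobs: list) -> str:
--     """ASCII histogram of score ranges (table-driven bucket lookup via binary search)."""
--     boundaries = [20, 35, 50, 65, 80]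
--     labels = ["0-19", "20-34", "35-49", "50-64", "65-79", "80-100"]
--     counts = [0, 0, 0, 0, 0, 0]
--     for job in jobs:
--         score = job.get("match_score", 0)
--         lo, hi = 0, 5
--         while lo < hi:
--             mid = (lo + hi) // 2
--             if score < boundaries[mid]:
--                 hi = mid
--             else:
--                 lo = mid + 1
--         counts[lo] += 1
--     max_count = max(counts)
--     lines = []
--     for label, count in zip(labels, counts):
--         bar_len = int((count / max_count) * 30) if max_count > 0 else 0
--         bar = "#" * bar_len
--         marker = " <-- threshold" if label == "35-49" else ""
--         lines.append(f"  {label:>6}% | {bar:<30} {count}{marker}")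
--     return "\n".join(lines)
-- ===== Notes on version B (the rewrite author's own statement) =====
-- stated objective: alternative
-- what changed: Replaces the six-way if/elif ladder over a string-keyed bucket dict with a sorted boundary table searched by a hand-written binary search that indexes into a counts list, keeping the identical formatting tail.
import Mathlib
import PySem

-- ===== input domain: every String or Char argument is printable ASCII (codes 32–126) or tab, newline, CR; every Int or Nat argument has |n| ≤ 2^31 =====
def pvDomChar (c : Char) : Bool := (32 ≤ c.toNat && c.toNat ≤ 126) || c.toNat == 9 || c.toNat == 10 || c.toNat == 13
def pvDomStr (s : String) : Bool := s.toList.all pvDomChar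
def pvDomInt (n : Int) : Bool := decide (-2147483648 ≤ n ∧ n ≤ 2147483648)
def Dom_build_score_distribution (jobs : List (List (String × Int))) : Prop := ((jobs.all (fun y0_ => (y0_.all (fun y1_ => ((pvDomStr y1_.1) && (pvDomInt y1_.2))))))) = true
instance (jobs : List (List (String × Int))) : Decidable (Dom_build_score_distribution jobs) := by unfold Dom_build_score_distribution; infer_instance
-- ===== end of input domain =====

-- B replaces A's six-way if/elif ladder over a string-keyed bucket dict by a sorted
-- boundary table searched by a hand-written binary search feeding an indexed counts list
-- (objective: alternative; same per-job cost).

-- ===== SHARED FLOAT HELPERS (both Pythons compute `int((count / max_count) * 30)`) =====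
-- IEEE-754 double emulation: round the positive rational p/q to the nearest double
-- (ties to even), returned as (mantissa m, exponent e) with value = m * 2^e and
-- 2^52 ≤ m < 2^53.  Exact whenever 2^(-256) ≤ p/q, which always holds here.
def pvRnd (p q : Nat) : Nat × Int :=
  let t := (p * 2 ^ 256) / q
  let E : Int := (Nat.log2 t : Int) - 256
  let sh : Int := 52 - E
  let nd : Nat × Nat := if 0 ≤ sh then (p * 2 ^ sh.toNat, q) else (p, q * 2 ^ (-sh).toNat)
  let d := nd.1 / nd.2
  let r := nd.1 % nd.2
  let m := if nd.2 < 2 * r then d + 1 else if 2 * r < nd.2 then d else if d % 2 = 1 then d + 1 else d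
  if m = 2 ^ 53 then (2 ^ 52, E - 52 + 1) else (m, E - 52)

-- Python's `int((count / max_count) * 30) if max_count > 0 else 0` with float division,
-- float multiplication and truncation; exact for 0 ≤ count ≤ max_count — the only way
-- either port calls it (count is one of the bucket counters, max_count their maximum).
def pvBarLen (count maxc : Int) : Int :=
  if 0 < maxc then
    if count = 0 then 0
    else
      let r1 := pvRnd count.toNat maxc.toNat
      let r2 := pvRnd (r1.1 * 30) (2 ^ (-r1.2).toNat)
      ((r2.1 >>> (-r2.2).toNat : Nat) : Int)
  else 0

-- One output line: f"  {label:>6}% | {bar:<30} {count}{marker}" — identical in both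
-- Pythons; the labels have length ≤ 6 and the bar length ≤ 30, so the pads are exact.
def pvFmtLine (label : String) (count maxc : Int) : String :=
  let lab := label.toList
  let blen := (pvBarLen count maxc).toNat
  String.mk ([' ', ' '] ++ List.replicate (6 - lab.length) ' ' ++ lab
    ++ ('%' :: ' ' :: '|' :: [' ']) ++ List.replicate blen '#'
    ++ List.replicate (30 - blen) ' ' ++ [' '] ++ PySem.Int.toChars count
    ++ (if label = "35-49" then " <-- threshold".toList else []))

-- ===== PORT A =====
-- the if/elif ladder, bumping one counter of the string-keyed bucket dict
def pvStepA (d : PySem.Dict String Int) (job : List (String × Int)) : PySem.Dict String Int :=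
  let score := (job.lookup "match_score").getD 0   -- job.get("match_score", 0): first match in the assoc list
  if score < 20 then d.modify "0-19" 0 (· + 1)     -- buckets[k] += 1 (the key is always present)
  else if score < 35 then d.modify "20-34" 0 (· + 1)
  else if score < 50 then d.modify "35-49" 0 (· + 1)
  else if score < 65 then d.modify "50-64" 0 (· + 1)
  else if score < 80 then d.modify "65-79" 0 (· + 1)
  else d.modify "80-100" 0 (· + 1)

def build_score_distribution (jobs : List (List (String × Int))) : String :=
  let buckets0 : PySem.Dict String Int :=
    PySem.Dict.ofList [("0-19", 0), ("20-34", 0), ("35-49", 0), ("50-64", 0), ("65-79", 0), ("80-100", 0)]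
  let buckets := jobs.foldl pvStepA buckets0
  -- max(buckets.values()) if buckets.values() else 1 — values() is always the 6 counters
  let max_count := match PySem.List.max? buckets.values (fun x => x) with
    | some m => m
    | none => 1
  let lines := buckets.items.foldl (fun ls p => ls ++ [pvFmtLine p.1 p.2 max_count]) ([] : List String)
  PySem.Str.join "\n" lines

-- ===== PORT B =====
def pvBoundaries : List Int := [20, 35, 50, 65, 80]
def pvLabels : List String := ["0-19", "20-34", "35-49", "50-64", "65-79", "80-100"]

-- the while-loop binary search over the boundary table (mid < 5 always, so getD is exact)
def pvBsearch (score : Int) (lo hi : Nat) : Nat :=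
  if h : lo < hi then
    let mid := (lo + hi) / 2
    if score < pvBoundaries.getD mid 0 then pvBsearch score lo mid else pvBsearch score (mid + 1) hi
  else lo
termination_by hi - lo
decreasing_by all_goals omega

def pvStepB (cs : List Int) (job : List (String × Int)) : List Int :=
  let score := (job.lookup "match_score").getD 0
  let i := pvBsearch score 0 5
  cs.set i (cs.getD i 0 + 1)   -- counts[i] += 1; i < 6 = len(counts) always

def build_score_distribution_alt (jobs : List (List (String × Int))) : String :=
  let counts := jobs.foldl pvStepB [0, 0, 0, 0, 0, 0]
  -- max(counts): counts is a nonempty 6-element list, so max? is never none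
  let max_count := match PySem.List.max? counts (fun x => x) with
    | some m => m
    | none => 0
  let lines := (pvLabels.zip counts).foldl (fun ls lc => ls ++ [pvFmtLine lc.1 lc.2 max_count]) ([] : List String)
  PySem.Str.join "\n" lines

-- ===== PRECONDITION & SPEC =====
def Spec_build_score_distribution (jobs : List (List (String × Int))) (out : String) : Prop := out = build_score_distribution_alt jobs
instance (jobs : List (List (String × Int))) (out : String) : Decidable (Spec_build_score_distribution jobs out) := by unfold Spec_build_score_distribution; infer_instance

-- ===== CLAIM (what is proved, stated in full; the proofs are below) =====
def Claim_equal_build_score_distribution : Prop := ∀ (jobs : List (List (String × Int))), Dom_build_score_distribution jobs → Spec_build_score_distribution jobs (build_score_distribution jobs)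

-- ===== LEMMAS AND PROOFS =====

-- A's ladder, read as the bucket index it selects
def pvLadderIdx (score : Int) : Nat :=
  if score < 20 then 0 else if score < 35 then 1 else if score < 50 then 2
  else if score < 65 then 3 else if score < 80 then 4 else 5

-- B's binary search lands exactly where A's ladder does
lemma pvBsearch_eq (s : Int) : pvBsearch s 0 5 = pvLadderIdx s := by
  by_cases h1 : s < 20 <;> by_cases h2 : s < 35 <;> by_cases h3 : s < 50 <;>
    by_cases h4 : s < 65 <;> by_cases h5 : s < 80 <;>
  first
  | omega
  | (unfold pvLadderIdx
     repeat (rw [pvBsearch]; norm_num [pvBoundaries, h1, h2, h3, h4, h5]))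

-- loop invariant: A's dict fold is B's counts fold zipped with the labels
lemma pv_loop_inv (jobs : List (List (String × Int))) (c0 c1 c2 c3 c4 c5 : Int) :
    jobs.foldl pvStepA (PySem.Dict.mk [("0-19", c0), ("20-34", c1), ("35-49", c2), ("50-64", c3), ("65-79", c4), ("80-100", c5)])
    = PySem.Dict.mk (pvLabels.zip (jobs.foldl pvStepB [c0, c1, c2, c3, c4, c5])) := by
  induction jobs generalizing c0 c1 c2 c3 c4 c5 with
  | nil => rfl
  | cons job rest ih =>
    simp only [List.foldl_cons]
    have hb := pvBsearch_eq ((job.lookup "match_score").getD 0)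
    by_cases h1 : (job.lookup "match_score").getD 0 < 20 <;>
      by_cases h2 : (job.lookup "match_score").getD 0 < 35 <;>
      by_cases h3 : (job.lookup "match_score").getD 0 < 50 <;>
      by_cases h4 : (job.lookup "match_score").getD 0 < 65 <;>
      by_cases h5 : (job.lookup "match_score").getD 0 < 80 <;>
    first
    | omega
    | (simp only [pvStepA, pvStepB, hb, pvLadderIdx, h1, h2, h3, h4, h5, if_true, if_false]
       simp [PySem.Dict.modify, PySem.Dict.insert, PySem.Dict.getD, PySem.Dict.get?, h1, h2, h3, h4, h5]
       apply ih)

-- B's fold only ever updates entries in place, so the counts list keeps its length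
lemma pvStepB_length (jobs : List (List (String × Int))) (cs : List Int) :
    (jobs.foldl pvStepB cs).length = cs.length := by
  induction jobs generalizing cs with
  | nil => rfl
  | cons job rest ih => simp [List.foldl_cons, ih, pvStepB, List.length_set]

-- ===== VERDICT (by name: the statement is the Claim_ definition above) =====
theorem build_score_distribution_spec : Claim_equal_build_score_distribution := by
  intro jobs _
  unfold Spec_build_score_distribution
  simp only [build_score_distribution, build_score_distribution_alt]
  rw [show PySem.Dict.ofList [("0-19", (0:Int)), ("20-34", 0), ("35-49", 0), ("50-64", 0), ("65-79", 0), ("80-100", 0)]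
      = PySem.Dict.mk [("0-19", 0), ("20-34", 0), ("35-49", 0), ("50-64", 0), ("65-79", 0), ("80-100", 0)] from by decide]
  rw [pv_loop_inv]
  obtain ⟨n0, n1, n2, n3, n4, n5, hc⟩ : ∃ a b c d e f,
      jobs.foldl pvStepB [0, 0, 0, 0, 0, 0] = [a, b, c, d, e, f] := by
    have h := pvStepB_length jobs [0, 0, 0, 0, 0, 0]
    generalize List.foldl pvStepB [0, 0, 0, 0, 0, 0] jobs = cs at h ⊢
    rcases cs with _ | ⟨a, _ | ⟨b, _ | ⟨c, _ | ⟨d, _ | ⟨e, _ | ⟨f, _ | g⟩⟩⟩⟩⟩⟩ <;> simp_all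
  rw [hc]
  simp [pvLabels, PySem.Dict.values, PySem.List.max?_id_cons]
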